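-- pv_equiv track=rewrite | github.com/Tyyredd/elevator-algorithm | main.py | scenario_1
-- ===== SOURCE A (Python) =====
-- def scenario_1(data):
--     floors = 0
--     prev_stop = data[0][0]
--     for start, stop in data:
--         offset = abs(start - prev_stop)
--         floors += abs(start - stop) + offset
--         prev_stop = stop
--     return floors
-- ===== SOURCE B (Python) =====
-- def scenario_1(data):
--     within = sum(abs(start - stop) for start, stop in data)
--     between = sum(abs(cur[0] - prev[1]) for prev, cur in zip(data, data[1:]))
--     return within + between
-- ===== Notes on version B (the rewrite author's own statement) =====
-- stated objective: simpler
-- what changed: Replaces the single fused loop carrying a prev_stop accumulator with two independent summations: per-trip distances plus distances between adjacent trips (the always-zero first offset is dropped).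
import Mathlib
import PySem

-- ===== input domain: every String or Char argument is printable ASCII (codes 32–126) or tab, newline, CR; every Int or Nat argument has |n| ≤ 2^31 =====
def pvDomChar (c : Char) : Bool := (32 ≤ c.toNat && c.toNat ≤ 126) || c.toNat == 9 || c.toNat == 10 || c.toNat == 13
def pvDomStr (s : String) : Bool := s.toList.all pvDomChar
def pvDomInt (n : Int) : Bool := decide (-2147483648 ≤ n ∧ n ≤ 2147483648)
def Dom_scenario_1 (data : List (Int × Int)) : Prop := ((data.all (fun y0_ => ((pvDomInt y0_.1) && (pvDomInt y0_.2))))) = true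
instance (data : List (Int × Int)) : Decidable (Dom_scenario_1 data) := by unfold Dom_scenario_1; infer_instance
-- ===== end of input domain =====

-- B sums per-trip distances and adjacent-trip gaps in two separate passes instead of A's
-- single fused loop with a prev_stop accumulator; same O(n) cost, plainer decomposition.

-- ===== PORT A =====
-- prev_stop = data[0][0]: IndexError on empty data (excluded by Pre_); the fold carries (floors, prev_stop).
def scenario_1 (data : List (Int × Int)) : Int :=
  match PySem.List.pyGet? data 0 with
  | none => 0  -- Python raises IndexError here; outside Pre_scenario_1
  | some p0 =>
    (data.foldl (fun (st : Int × Int) (x : Int × Int) =>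
        (st.1 + |x.1 - x.2| + |x.1 - st.2|, x.2)) (0, p0.1)).1

-- ===== PORT B =====
def scenario_1_alt (data : List (Int × Int)) : Int :=
  let within := (data.map (fun p => |p.1 - p.2|)).sum
  let between := ((data.zip data.tail).map (fun pc => |pc.2.1 - pc.1.2|)).sum
  within + between

-- ===== PRECONDITION & SPEC =====
-- Pre_ excludes only the empty list, on which A raises IndexError (data[0][0]).
def Pre_scenario_1 (data : List (Int × Int)) : Prop := data ≠ []
instance (data : List (Int × Int)) : Decidable (Pre_scenario_1 data) := by unfold Pre_scenario_1; infer_instance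
def pvWitness_scenario_1 : (List (Int × Int)) := [(1, 5), (3, 0)]

def Spec_scenario_1 (data : List (Int × Int)) (out : Int) : Prop := out = scenario_1_alt data
instance (data : List (Int × Int)) (out : Int) : Decidable (Spec_scenario_1 data out) := by unfold Spec_scenario_1; infer_instance

-- ===== CLAIM (what is proved, stated in full; the proofs are below) =====
def Claim_equal_scenario_1 : Prop := ∀ (data : List (Int × Int)), Dom_scenario_1 data → Pre_scenario_1 data → Spec_scenario_1 data (scenario_1 data)

-- ===== LEMMAS AND PROOFS =====

-- Invariant of A's fold: starting from (c, p), the accumulated floors equal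
-- c + (per-trip distances of l) + (chain of gaps starting at p).
theorem scenario1_fold_inv (l : List (Int × Int)) (c p : Int) :
    (l.foldl (fun (st : Int × Int) (x : Int × Int) =>
        (st.1 + |x.1 - x.2| + |x.1 - st.2|, x.2)) (c, p)).1
      = c + (l.map (fun q => |q.1 - q.2|)).sum
          + ((((p, p) :: l).zip l).map (fun pc => |pc.2.1 - pc.1.2|)).sum := by
  induction l generalizing c p with
  | nil => simp
  | cons x t ih =>
    simp only [List.foldl_cons, List.map_cons, List.sum_cons, List.zip_cons_cons]
    rw [ih]
    cases t with
    | nil => simp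
    | cons y u =>
      simp only [List.zip_cons_cons, List.map_cons, List.sum_cons]
      ring

-- ===== VERDICT (by name: the statement is the Claim_ definition above) =====
theorem scenario_1_spec : Claim_equal_scenario_1 := by
  intro data _ hpre
  unfold Spec_scenario_1 scenario_1 scenario_1_alt
  cases data with
  | nil => exact absurd rfl hpre
  | cons h t =>
    simp only [PySem.List.pyGet?, PySem.List.pyIdx?]
    norm_num
    rw [scenario1_fold_inv]
    cases t with
    | nil => simp
    | cons y u =>
      simp only [List.zip_cons_cons, List.map_cons, List.sum_cons]
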